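-- pv_equiv track=rewrite | github.com/nietsdoenster/eurovisionfiles | examenopdracht.py | count_non_europeancountries
-- ===== SOURCE A (Python) =====
-- def count_non_europeancountries(tokens):
-- 	first1 = tokens
-- 	count = 0
-- 	for token in first1:
-- 		if token in ['Australia', 'Georgia', 'Armenia', 'Turkey', 'Azerbaijan', 'Israel']:
-- 			count +=1
-- 		else:
-- 			None
-- 	return count
-- ===== SOURCE B (Python) =====
-- from collections import Counter
--
-- def count_non_europeancountries(tokens):
--     counts = Counter(tokens)
--     total = 0
--     for country in ('Australia', 'Georgia', 'Armenia', 'Turkey', 'Azerbaijan', 'Israel'):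
--         total += counts[country]
--     return total
-- ===== Notes on version B (the rewrite author's own statement) =====
-- stated objective: alternative
-- what changed: B builds a frequency table of the tokens once (collections.Counter) and then sums the looked-up counts of the six fixed country names, instead of testing each token against the six-element list.
import Mathlib
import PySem

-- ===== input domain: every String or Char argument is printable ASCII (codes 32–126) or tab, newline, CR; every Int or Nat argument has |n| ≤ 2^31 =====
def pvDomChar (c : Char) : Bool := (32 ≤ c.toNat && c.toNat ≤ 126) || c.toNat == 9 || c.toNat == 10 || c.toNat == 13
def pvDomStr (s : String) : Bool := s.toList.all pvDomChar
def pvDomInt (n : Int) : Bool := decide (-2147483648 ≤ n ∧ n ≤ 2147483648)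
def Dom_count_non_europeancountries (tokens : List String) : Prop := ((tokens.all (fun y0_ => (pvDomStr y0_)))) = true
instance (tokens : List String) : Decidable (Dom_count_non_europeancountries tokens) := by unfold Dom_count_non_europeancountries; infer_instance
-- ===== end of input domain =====

-- B builds a Counter of the tokens once and sums the counts of the six country names; alternative decomposition, same result.

-- ===== PORT A =====
def count_non_europeancountries (tokens : List String) : Int :=
  tokens.foldl
    (fun count token =>
      if token ∈ ["Australia", "Georgia", "Armenia", "Turkey", "Azerbaijan", "Israel"]
      then count + 1 else count)
    0

-- ===== PORT B =====
def count_non_europeancountries_alt (tokens : List String) : Int :=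
  let counts := PySem.Dict.counter tokens
  ["Australia", "Georgia", "Armenia", "Turkey", "Azerbaijan", "Israel"].foldl
    (fun total country => total + counts.getD country 0) 0

-- ===== PRECONDITION & SPEC =====
def Spec_count_non_europeancountries (tokens : List String) (out : Int) : Prop := out = count_non_europeancountries_alt tokens
instance (tokens : List String) (out : Int) : Decidable (Spec_count_non_europeancountries tokens out) := by unfold Spec_count_non_europeancountries; infer_instance

-- ===== CLAIM (what is proved, stated in full; the proofs are below) =====
def Claim_equal_count_non_europeancountries : Prop := ∀ (tokens : List String), Dom_count_non_europeancountries tokens → Spec_count_non_europeancountries tokens (count_non_europeancountries tokens)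

-- ===== LEMMAS AND PROOFS =====

theorem pvA_shift (ts : List String) (c : Int) :
    ts.foldl
      (fun count token =>
        if token ∈ ["Australia", "Georgia", "Armenia", "Turkey", "Azerbaijan", "Israel"]
        then count + 1 else count) c
    = c + count_non_europeancountries ts := by
  induction ts generalizing c with
  | nil => simp [count_non_europeancountries]
  | cons t ts ih =>
      simp only [count_non_europeancountries, List.foldl_cons]
      rw [ih, ih]
      split_ifs <;> ring

theorem pvMain (ts : List String) :
    count_non_europeancountries ts = count_non_europeancountries_alt ts := by
  induction ts with
  | nil => decide
  | cons t ts ih =>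
      simp only [count_non_europeancountries, List.foldl_cons]
      rw [pvA_shift, ih]
      simp only [count_non_europeancountries_alt, PySem.Dict.getD_counter,
        List.foldl_cons, List.count_cons]
      by_cases h1 : t = "Australia" <;> by_cases h2 : t = "Georgia" <;>
        by_cases h3 : t = "Armenia" <;> by_cases h4 : t = "Turkey" <;>
        by_cases h5 : t = "Azerbaijan" <;> by_cases h6 : t = "Israel" <;>
        simp_all <;> omega

-- ===== VERDICT (by name: the statement is the Claim_ definition above) =====
theorem count_non_europeancountries_spec : Claim_equal_count_non_europeancountries := by
  intro tokens _
  exact pvMain tokens
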